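-- pv_equiv track=rewrite | github.com/losper/audio | test/py/hashy.py | to_hash
-- ===== SOURCE A (Python) =====
-- def to_hash(list_v):
--     """
--     BKDRHash
--     """
--     seed = 131
--     hash_v = 0
--     if isinstance('a', str):
--         for itor in list_v:
--             hash_v = hash_v*seed+ord(itor)
--     else:
--         for itor in list_v:
--             hash_v = hash_v*seed+itor
--     return hash_v & 0x7FFFFFFF
-- ===== SOURCE B (Python) =====
-- def to_hash(list_v):
--     """BKDRHash: sum explicit positional weights, walking the data back-to-front."""
--     total = 0
--     p = 1
--     for c in reversed(list(list_v)):
--         total += ord(c) * p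
--         p *= 131
--     return total & 0x7FFFFFFF
-- ===== Notes on version B (the rewrite author's own statement) =====
-- stated objective: alternative
-- what changed: Replaces A's left-to-right Horner fold (hash = hash*131 + ord(c)) by a back-to-front pass that maintains the positional weight 131^k and sums ord(c)*weight, then applies the same mask.
import Mathlib
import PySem

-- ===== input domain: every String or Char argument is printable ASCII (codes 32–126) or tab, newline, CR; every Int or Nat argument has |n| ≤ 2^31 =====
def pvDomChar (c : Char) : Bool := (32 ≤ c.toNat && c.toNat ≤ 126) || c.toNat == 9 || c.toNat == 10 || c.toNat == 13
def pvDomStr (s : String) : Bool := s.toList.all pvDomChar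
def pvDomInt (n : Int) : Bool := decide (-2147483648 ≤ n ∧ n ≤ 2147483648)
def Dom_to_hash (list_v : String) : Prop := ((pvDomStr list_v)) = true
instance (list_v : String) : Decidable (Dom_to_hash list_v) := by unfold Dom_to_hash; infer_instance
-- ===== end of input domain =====

-- B replaces A's Horner-style left fold by a direct polynomial sum with explicit positional weights; same values, no speed claim.

-- ===== PORT A =====
-- the isinstance('a', str) guard is constant-True, so the ord branch always runs
def to_hash (list_v : String) : Int :=
  let hash_v : Int := list_v.toList.foldl (fun h c => h * 131 + (c.toNat : Int)) 0
  PySem.Int.band hash_v 0x7FFFFFFF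

-- ===== PORT B =====
def to_hash_alt (list_v : String) : Int :=
  let st := list_v.toList.reverse.foldl
    (fun (st : Int × Int) c => (st.1 + (c.toNat : Int) * st.2, st.2 * 131)) (0, 1)
  PySem.Int.band st.1 0x7FFFFFFF

-- ===== PRECONDITION & SPEC =====
def Spec_to_hash (list_v : String) (out : Int) : Prop := out = to_hash_alt list_v
instance (list_v : String) (out : Int) : Decidable (Spec_to_hash list_v out) := by unfold Spec_to_hash; infer_instance

-- ===== CLAIM (what is proved, stated in full; the proofs are below) =====
def Claim_equal_to_hash : Prop := ∀ (list_v : String), Dom_to_hash list_v → Spec_to_hash list_v (to_hash list_v)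

-- ===== LEMMAS AND PROOFS =====

theorem horner_append (l : List Char) (a : Int) (c : Char) :
    (l ++ [c]).foldl (fun h c => h * 131 + (c.toNat : Int)) a
      = (l.foldl (fun h c => h * 131 + (c.toNat : Int)) a) * 131 + c.toNat := by
  simp [List.foldl_append]

theorem rev_fold_eq_horner (r : List Char) (t p : Int) :
    r.foldl (fun (st : Int × Int) c => (st.1 + (c.toNat : Int) * st.2, st.2 * 131)) (t, p)
      = (t + p * r.reverse.foldl (fun h c => h * 131 + (c.toNat : Int)) 0, p * 131 ^ r.length) := by
  induction r generalizing t p with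
  | nil => simp
  | cons c r ih =>
    simp only [List.foldl, List.reverse_cons]
    rw [ih, horner_append]
    simp only [List.length_cons, pow_succ]
    exact Prod.ext (by ring) (by ring)

-- ===== VERDICT (by name: the statement is the Claim_ definition above) =====
theorem to_hash_spec : Claim_equal_to_hash := by
  intro list_v _
  unfold Spec_to_hash to_hash to_hash_alt
  rw [rev_fold_eq_horner]
  simp
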